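-- pv_equiv track=rewrite | github.com/cardel/FADA | 2023-2/Corte1/1-Algoritmos/Programa5.py | programa5
-- ===== SOURCE A (Python) =====
-- def programa5(n):
--     i = 1
--     cnt = 1
--     while i<= n:
--         cnt = cnt + 1 #Entrada while
--         k = i
--         cnt+= 1
--         while k<= n:
--             cnt += 1 #Entrada while
--             k = k+2
--             cnt += 1
--         cnt += 1 #Salida while
--         k = 1
--         cnt+= 1
--         while k<=i:
--             cnt += 1 #Entrada while
--             k = k+1
--             cnt += 1
--         cnt += 1 #Salida while
--         i=2*i
--         cnt+= 1
--     cnt = cnt + 1 #Salida while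
--     return cnt
-- ===== SOURCE B (Python) =====
-- def programa5(n):
--     # Closed-form per outer iteration: inner loops contribute 2*iterations each.
--     cnt = 2  # initial cnt = 1 plus the final "Salida while" increment
--     i = 1
--     while i <= n:
--         t1 = (n - i) // 2 + 1   # iterations of the k += 2 loop (i <= n here)
--         cnt += 6 + 2 * t1 + 2 * i
--         i *= 2
--     return cnt
-- ===== Notes on version B (the rewrite author's own statement) =====
-- stated objective: faster
-- what changed: B keeps only the outer doubling loop and replaces both inner counting loops by closed-form iteration counts ((n-i)//2+1 and i), adding their contribution arithmetically.
import Mathlib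
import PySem

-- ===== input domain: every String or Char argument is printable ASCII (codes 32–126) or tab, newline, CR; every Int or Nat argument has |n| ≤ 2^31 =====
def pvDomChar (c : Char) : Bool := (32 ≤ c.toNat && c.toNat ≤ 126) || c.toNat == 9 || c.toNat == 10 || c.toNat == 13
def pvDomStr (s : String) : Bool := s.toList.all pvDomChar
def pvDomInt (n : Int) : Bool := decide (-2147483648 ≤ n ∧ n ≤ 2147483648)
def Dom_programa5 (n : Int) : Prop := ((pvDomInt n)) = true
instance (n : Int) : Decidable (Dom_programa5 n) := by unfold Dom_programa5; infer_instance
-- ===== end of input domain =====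

-- B replaces A's two inner counting loops by closed-form iteration counts, keeping only the outer doubling loop (faster asymptotically, as measured).


-- ===== PORT A =====
-- inner loop 1: while k <= n: cnt += 1; k = k+2; cnt += 1
def programa5_loop1 (n k cnt : Int) : Int :=
  if k ≤ n then programa5_loop1 n (k + 2) (cnt + 2) else cnt
termination_by (n + 1 - k).toNat
decreasing_by omega

-- inner loop 2: while k <= i: cnt += 1; k = k+1; cnt += 1
def programa5_loop2 (i k cnt : Int) : Int :=
  if k ≤ i then programa5_loop2 i (k + 1) (cnt + 2) else cnt
termination_by (i + 1 - k).toNat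
decreasing_by omega

-- outer loop: while i <= n (i starts at 1, doubles; the 1 ≤ i proof argument certifies termination)
def programa5_outer (n i cnt : Int) (hi : 1 ≤ i) : Int :=
  if i ≤ n then
    programa5_outer n (2 * i) (programa5_loop2 i 1 (programa5_loop1 n i (cnt + 2) + 2) + 2) (by omega)
  else cnt
termination_by (n + 1 - i).toNat
decreasing_by omega

def programa5 (n : Int) : Int := programa5_outer n 1 1 (by norm_num) + 1

-- ===== PORT B =====
def programa5_alt_loop (n i cnt : Int) (hi : 1 ≤ i) : Int :=
  if i ≤ n then
    programa5_alt_loop n (2 * i) (cnt + 6 + 2 * (PySem.Int.floordiv (n - i) 2 + 1) + 2 * i) (by omega)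
  else cnt
termination_by (n + 1 - i).toNat
decreasing_by omega

def programa5_alt (n : Int) : Int := programa5_alt_loop n 1 2 (by norm_num)

-- ===== PRECONDITION & SPEC =====
def Spec_programa5 (n : Int) (out : Int) : Prop := out = programa5_alt n
instance (n : Int) (out : Int) : Decidable (Spec_programa5 n out) := by unfold Spec_programa5; infer_instance

-- ===== CLAIM (what is proved, stated in full; the proofs are below) =====
def Claim_equal_programa5 : Prop := ∀ (n : Int), Dom_programa5 n → Spec_programa5 n (programa5 n)

-- ===== LEMMAS AND PROOFS =====
theorem loop1_eq (n : Int) : ∀ k cnt : Int, programa5_loop1 n k cnt =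
    cnt + (if k ≤ n then 2 * ((n - k) / 2 + 1) else 0) := by
  intro k cnt
  induction k, cnt using programa5_loop1.induct n with
  | case1 k cnt h ih =>
      rw [programa5_loop1, if_pos h, ih]
      by_cases h2 : k + 2 ≤ n <;> simp [h, h2] <;> omega
  | case2 k cnt h =>
      rw [programa5_loop1, if_neg h]; simp [h]

theorem loop2_eq (i : Int) : ∀ k cnt : Int, programa5_loop2 i k cnt =
    cnt + (if k ≤ i then 2 * (i - k + 1) else 0) := by
  intro k cnt
  induction k, cnt using programa5_loop2.induct i with
  | case1 k cnt h ih =>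
      rw [programa5_loop2, if_pos h, ih]
      by_cases h2 : k + 1 ≤ i <;> simp [h, h2] <;> omega
  | case2 k cnt h =>
      rw [programa5_loop2, if_neg h]; simp [h]

theorem outer_eq_alt (n : Int) : ∀ (i cnt : Int) (hi : 1 ≤ i),
    programa5_outer n i cnt hi + 1 = programa5_alt_loop n i (cnt + 1) hi := by
  intro i cnt hi
  induction i, cnt, hi using programa5_outer.induct n with
  | case1 i cnt hi h ih =>
      rw [programa5_outer, programa5_alt_loop, if_pos h, if_pos h]
      simp only [loop1_eq, loop2_eq, if_pos h, if_pos hi] at ih ⊢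
      rw [ih]
      congr 1
      rw [PySem.Int.floordiv_eq_ediv_of_pos (by norm_num : (0:Int) < 2)]
      ring
  | case2 i cnt hi h =>
      rw [programa5_outer, programa5_alt_loop, if_neg h, if_neg h]

-- ===== VERDICT (by name: the statement is the Claim_ definition above) =====
theorem programa5_spec : Claim_equal_programa5 := by
  intro n _
  unfold Spec_programa5 programa5 programa5_alt
  rw [outer_eq_alt]
  norm_num
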